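-- pv_equiv track=rewrite | github.com/ayrat-l/store_revenue | app/lib.py | store_with_best_profit
-- ===== SOURCE A (Python) =====
-- def store_with_best_profit(stores):
--     """
--     >>> store_with_best_profit([[10,20,30,40,50], [15,10,25,34,40], [30,5,10,10,15]])
--     [0]
--
--     """
--     store_profit = [] #Общий доход каждого магазина
--     for store in stores:
--         store_profit.append(sum(store))
--
--     top_store_index = [] #Находим индекс лучшего магазина по суммарной выручке
--     for index, profit in enumerate(store_profit):
--         if profit == max(store_profit):
--             top_store_index.append(index)
--     return top_store_index
-- ===== SOURCE B (Python) =====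
-- def store_with_best_profit(stores):
--     best = None
--     result = []
--     for index, store in enumerate(stores):
--         s = sum(store)
--         if best is None or s > best:
--             best = s
--             result = [index]
--         elif s == best:
--             result.append(index)
--     return result
-- ===== Notes on version B (the rewrite author's own statement) =====
-- stated objective: simpler
-- what changed: Single online pass maintaining the running best sum and its index list, instead of building a list of all sums and rescanning it with max() recomputed inside the filter loop.
import Mathlib
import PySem

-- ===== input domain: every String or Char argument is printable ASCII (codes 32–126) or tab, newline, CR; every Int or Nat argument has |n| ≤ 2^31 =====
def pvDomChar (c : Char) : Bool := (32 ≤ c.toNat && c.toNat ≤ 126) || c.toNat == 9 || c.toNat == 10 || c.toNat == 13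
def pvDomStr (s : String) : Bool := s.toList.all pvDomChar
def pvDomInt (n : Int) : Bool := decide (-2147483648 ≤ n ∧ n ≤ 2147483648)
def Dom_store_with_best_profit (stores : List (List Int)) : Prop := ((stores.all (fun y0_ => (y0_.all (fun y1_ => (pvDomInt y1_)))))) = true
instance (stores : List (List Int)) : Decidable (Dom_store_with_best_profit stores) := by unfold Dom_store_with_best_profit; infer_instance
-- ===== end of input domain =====

-- B replaces A's build-all-sums-then-rescan (with max() recomputed inside the filter loop)
-- by a single online pass keeping the running best sum and its index list (objective: simpler).


-- ===== PORT A =====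
def store_with_best_profit (stores : List (List Int)) : List Int :=
  let store_profit := stores.foldl (fun acc store => acc ++ [store.sum]) []
  (PySem.List.enumerate store_profit).foldl
    (fun acc p => if PySem.List.max? store_profit (fun y => y) == some p.2 then acc ++ [p.1] else acc)
    []

-- ===== PORT B =====
-- the loop body of Source B (best is None / s > best / s == best)
def pvStepB (st : Option Int × List Int) (p : Int × List Int) : Option Int × List Int :=
  let s := p.2.sum
  match st.1 with
  | none => (some s, [p.1])
  | some best =>
    if s > best then (some s, [p.1])
    else if s == best then (st.1, st.2 ++ [p.1])
    else st

def store_with_best_profit_alt (stores : List (List Int)) : List Int :=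
  ((PySem.List.enumerate stores).foldl pvStepB ((none : Option Int), ([] : List Int))).2

-- ===== PRECONDITION & SPEC =====
def Spec_store_with_best_profit (stores : List (List Int)) (out : List Int) : Prop := out = store_with_best_profit_alt stores
instance (stores : List (List Int)) (out : List Int) : Decidable (Spec_store_with_best_profit stores out) := by unfold Spec_store_with_best_profit; infer_instance

-- ===== CLAIM (what is proved, stated in full; the proofs are below) =====
def Claim_equal_store_with_best_profit : Prop := ∀ (stores : List (List Int)), Dom_store_with_best_profit stores → Spec_store_with_best_profit stores (store_with_best_profit stores)

-- ===== LEMMAS AND PROOFS =====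

-- A's output as filter-then-map over the enumerated sums
def pvFiltA (sums : List Int) : List Int :=
  ((PySem.List.enumerate sums).filter
    (fun p => PySem.List.max? sums (fun y => y) == some p.2)).map (·.1)

-- the B-loop body specialised to the sums list
def pvStepS (st : Option Int × List Int) (p : Int × Int) : Option Int × List Int :=
  match st.1 with
  | none => (some p.2, [p.1])
  | some best =>
    if p.2 > best then (some p.2, [p.1])
    else if p.2 == best then (st.1, st.2 ++ [p.1])
    else st

theorem pvA_eq (stores : List (List Int)) :
    store_with_best_profit stores = pvFiltA (stores.map List.sum) := by
  unfold store_with_best_profit pvFiltA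
  rw [show stores.foldl (fun acc store => acc ++ [store.sum]) [] = stores.map List.sum by
    simpa using PySem.List.foldl_append_singleton_eq_map (fun store => store.sum) stores []]
  simpa using PySem.List.foldl_append_if
    (fun p : Int × Int => PySem.List.max? (stores.map List.sum) (fun y => y) == some p.2)
    (·.1) (PySem.List.enumerate (stores.map List.sum)) []

theorem pvB_bridge (stores : List (List Int)) (s : Int) (st : Option Int × List Int) :
    (PySem.List.enumerate stores s).foldl pvStepB st
      = (PySem.List.enumerate (stores.map List.sum) s).foldl pvStepS st := by
  induction stores generalizing s st with
  | nil => simp [PySem.List.enumerate]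
  | cons x xs ih =>
    simp only [List.map_cons, PySem.List.enumerate_cons, List.foldl_cons]
    rw [ih]
    rfl

theorem pvMax_snoc (xs : List Int) (x : Int) :
    PySem.List.max? (xs ++ [x]) (fun y => y)
      = some (match PySem.List.max? xs (fun y => y) with | none => x | some b => max b x) := by
  cases xs with
  | nil =>
    rw [show PySem.List.max? ([] : List Int) (fun y => y) = none from
      (PySem.List.max?_eq_none_iff _ _).mpr rfl]
    simp [PySem.List.max?_id_cons]
  | cons a t =>
    rw [List.cons_append, PySem.List.max?_id_cons, PySem.List.max?_id_cons]
    simp [List.foldl_append]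

theorem pvSnd_mem_of_mem_enumerate {α : Type} {p : Int × α} {xs : List α} {s : Int}
    (h : p ∈ PySem.List.enumerate xs s) : p.2 ∈ xs := by
  have := PySem.List.map_snd_enumerate xs s
  exact this ▸ List.mem_map_of_mem h

theorem pvInv (sums : List Int) :
    (PySem.List.enumerate sums).foldl pvStepS ((none : Option Int), ([] : List Int))
      = (PySem.List.max? sums (fun y => y), pvFiltA sums) := by
  induction sums using List.reverseRecOn with
  | nil => simp [PySem.List.enumerate, pvFiltA, PySem.List.max?]
  | append_singleton xs x ih =>
    rw [show (PySem.List.enumerate (xs ++ [x]) 0)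
          = PySem.List.enumerate xs 0 ++ [((xs.length : Int), x)] by
        simpa using PySem.List.enumerate_append xs [x] 0,
      List.foldl_append, ih, pvMax_snoc]
    unfold pvFiltA
    rw [show (PySem.List.enumerate (xs ++ [x]) 0)
          = PySem.List.enumerate xs 0 ++ [((xs.length : Int), x)] by
        simpa using PySem.List.enumerate_append xs [x] 0,
      pvMax_snoc]
    cases hm : PySem.List.max? xs (fun y => y) with
    | none =>
      have hx : xs = [] := (PySem.List.max?_eq_none_iff xs (fun y => y)).mp hm
      subst hx
      simp [pvStepS, PySem.List.enumerate]
    | some b =>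
      have hmax : ∀ y ∈ xs, y ≤ b := fun y hy => PySem.List.max?_isMax hm y hy
      rcases lt_trichotomy b x with hbx | hbx | hbx
      · -- new strict maximum: prefix filter is empty
        have hmx : max b x = x := max_eq_right (le_of_lt hbx)
        simp [pvStepS, hbx, hmx]
        intro a y hp
        have : y ≤ b := hmax y (pvSnd_mem_of_mem_enumerate (p := (a, y)) hp)
        omega
      · -- tie with the old maximum
        subst hbx
        simp [pvStepS, max_self]
      · -- strictly smaller: nothing changes
        have hmx : max b x = b := max_eq_left (le_of_lt hbx)
        have hne : ¬ ((b : Int) == x) = true := by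
          simp only [beq_iff_eq]; omega
        simp [pvStepS, hmx, not_lt_of_gt hbx, hne]
        omega

-- ===== VERDICT (by name: the statement is the Claim_ definition above) =====
theorem store_with_best_profit_spec : Claim_equal_store_with_best_profit := by
  intro stores _
  unfold Spec_store_with_best_profit store_with_best_profit_alt
  rw [pvB_bridge, pvInv, pvA_eq]
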